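-- pv_equiv track=rewrite | github.com/AmoxcAILab/u300yoh | pipeline/htr_descriptive_analysis/pre/pipeline/build_corpus_report_orig.py | train_test_by_style
-- ===== SOURCE A (Python) =====
-- from collections import Counter, defaultdict
--
-- def fmt_int(value: int) -> str:
--     return f"{value:,}"
--
-- def fmt_pct(part: int | float, total: int | float) -> str:
--     if total == 0:
--         return "0.00%"
--     return f"{(part / total) * 100:.2f}%"
--
-- def train_test_by_style(train_pairs: list[dict], test_pairs: list[dict]) -> list[list[object]]:
--     train_counts = Counter(p["style"] for p in train_pairs)
--     test_counts = Counter(p["style"] for p in test_pairs)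
--
--     styles = sorted(set(train_counts) | set(test_counts))
--     total_train = sum(train_counts.values())
--     total_test = sum(test_counts.values())
--
--     rows: list[list[object]] = []
--
--     for style in styles:
--         train_n = train_counts.get(style, 0)
--         test_n = test_counts.get(style, 0)
--         rows.append([
--             style,
--             f"{fmt_int(train_n)} ({fmt_pct(train_n, total_train)})",
--             f"{fmt_int(test_n)} ({fmt_pct(test_n, total_test)})",
--             fmt_int(train_n + test_n),
--         ])
--
--     return rows
-- ===== SOURCE B (Python) =====
-- def fmt_int(value: int) -> str:
--     s = str(abs(value))
--     out = ""
--     while len(s) > 3: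
--         out = "," + s[-3:] + out
--         s = s[:-3]
--     return ("-" if value < 0 else "") + s + out
--
-- def fmt_pct(part, total) -> str:
--     return f"{part / total:.2%}" if total else "0.00%"
--
-- def _runs(styles: list) -> list:
--     """Run-length encode an already-sorted list of styles into (style, count) pairs."""
--     if not styles:
--         return []
--     s = styles[0]
--     n = 1
--     while n < len(styles) and styles[n] == s:
--         n += 1
--     return [(s, n)] + _runs(styles[n:])
--
-- def _sorted_styles(pairs: list) -> list:
--     return sorted(p["style"] for p in pairs)
--
-- def train_test_by_style(train_pairs: list, test_pairs: list) -> list: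
--     train = _runs(_sorted_styles(train_pairs))
--     test = _runs(_sorted_styles(test_pairs))
--     total_train = len(train_pairs)
--     total_test = len(test_pairs)
--
--     rows = []
--     i = j = 0
--     while i < len(train) or j < len(test):
--         if j >= len(test) or (i < len(train) and train[i][0] < test[j][0]):
--             style, tn, sn = train[i][0], train[i][1], 0
--             i += 1
--         elif i >= len(train) or test[j][0] < train[i][0]:
--             style, tn, sn = test[j][0], 0, test[j][1]
--             j += 1
--         else:
--             style, tn, sn = train[i][0], train[i][1], test[j][1]
--             i += 1
--             j += 1
--         rows.append([
--             style,
--             f"{fmt_int(tn)} ({fmt_pct(tn, total_train)})",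
--             f"{fmt_int(sn)} ({fmt_pct(sn, total_test)})",
--             fmt_int(tn + sn),
--         ])
--     return rows
-- ===== Notes on version B (the rewrite author's own statement) =====
-- stated objective: alternative
-- what changed: Replaces the two Counter hash maps and the sorted-set-union key pass by sorting each split's style list, run-length encoding it, and emitting the rows via a two-pointer merge of the two sorted (style, count) streams, with len() as the totals; the formatting helpers are rewritten too (chunk-based comma grouping, :.2% percent formatting).
import Mathlib
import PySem

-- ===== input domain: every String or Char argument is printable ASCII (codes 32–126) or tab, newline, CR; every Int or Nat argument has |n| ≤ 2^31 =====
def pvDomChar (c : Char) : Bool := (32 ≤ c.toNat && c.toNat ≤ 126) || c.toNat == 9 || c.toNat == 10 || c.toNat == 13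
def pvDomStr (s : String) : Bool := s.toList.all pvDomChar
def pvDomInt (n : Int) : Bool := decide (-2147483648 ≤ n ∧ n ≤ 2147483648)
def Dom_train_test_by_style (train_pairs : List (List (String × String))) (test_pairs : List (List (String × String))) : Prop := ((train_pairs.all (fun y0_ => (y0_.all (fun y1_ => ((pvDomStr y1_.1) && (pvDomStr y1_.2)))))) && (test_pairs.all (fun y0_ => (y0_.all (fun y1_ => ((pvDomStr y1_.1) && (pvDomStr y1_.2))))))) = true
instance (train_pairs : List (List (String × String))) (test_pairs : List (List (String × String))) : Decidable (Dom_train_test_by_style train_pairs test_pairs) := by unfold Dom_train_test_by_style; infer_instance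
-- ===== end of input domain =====

-- B replaces the two Counters by sort + run-length encoding and a two-pointer merge of the
-- sorted per-split (style, count) streams, with its own rewritten formatting helpers;
-- same rows, no speed claim (objective: alternative).

-- ===== PORT A =====

-- comma grouping of a digit string, f"{value:,}" (A's fmt_int, right-recursive)
def pvGrp (ds : List Char) : List Char :=
  if _h : ds.length ≤ 3 then ds
  else pvGrp (ds.take (ds.length - 3)) ++ ',' :: ds.drop (ds.length - 3)
termination_by ds.length
decreasing_by simp [List.length_take]; omega

-- port of A's fmt_int
def fmtInt (n : Int) : String :=
  if n < 0 then String.ofList ('-' :: pvGrp (PySem.Int.toStr (-n)).toList)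
  else String.ofList (pvGrp (PySem.Int.toStr n).toList)

def pvBitLen (a : Nat) : Nat := if a = 0 then 0 else Nat.log2 a + 1

def pvShift (a b : Nat) (s : Int) : Nat × Nat :=
  if 0 ≤ s then (a <<< s.toNat, b) else (a, b <<< (-s).toNat)

-- round a/b (a,b > 0) half-to-even to a 53-bit significand: value = m / 2^s with 2^52 ≤ m < 2^53
def pvRnd53 (a b : Nat) : Nat × Int :=
  let s0 : Int := 52 + (pvBitLen b : Int) - (pvBitLen a : Int)
  let nd0 := pvShift a b s0
  let q0 := nd0.1 / nd0.2
  let s : Int := if q0 < 2 ^ 52 then s0 + 1 else if 2 ^ 53 ≤ q0 then s0 - 1 else s0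
  let nd := pvShift a b s
  let q := nd.1 / nd.2
  let r := nd.1 - q * nd.2
  let m := if nd.2 < 2 * r then q + 1 else if 2 * r < nd.2 then q else q + q % 2
  if m = 2 ^ 53 then (2 ^ 52, s - 1) else (m, s)

-- round x / 2^s half-to-even to an integer (s ≥ 1 at every call site)
def pvHalfEvenDiv (x s : Nat) : Nat :=
  let q := x >>> s
  let r := x - (q <<< s)
  let h := 2 ^ (s - 1)
  if h < r then q + 1 else if r < h then q else q + q % 2

-- port of A's fmt_pct: exact bit-level model of f"{(part/total)*100:.2f}%" (two IEEE-double
-- roundings, then correctly-rounded half-even 2-decimal formatting); exact for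
-- 0 ≤ part ≤ total, which is the only argument shape either port ever passes
def fmtPct (part total : Int) : String :=
  if total = 0 then "0.00%"
  else if part ≤ 0 then "0.00%"
  else
    let ms1 := pvRnd53 part.toNat total.toNat       -- double(part/total)
    let x := ms1.1 * 100
    let L := pvBitLen x
    let ms2 : Nat × Int :=                          -- double(double(part/total) * 100)
      if L ≤ 53 then (x, ms1.2)
      else
        let k := L - 53
        let m := pvHalfEvenDiv x k
        if m = 2 ^ 53 then (2 ^ 52, ms1.2 - (k : Int) - 1) else (m, ms1.2 - (k : Int))
    let N := pvHalfEvenDiv (ms2.1 * 100) ms2.2.toNat   -- hundredths, rounded half-even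
    PySem.Int.toStr ((N / 100 : Nat) : Int) ++ "." ++ PySem.Str.zfill (PySem.Int.toStr ((N % 100 : Nat) : Int)) 2 ++ "%"

-- p["style"]: first-match association-list lookup; the "" default is never used under Pre_
def pvStyleOf (p : List (String × String)) : String := (PySem.Dict.mk p).getD "style" ""

def train_test_by_style (train_pairs : List (List (String × String))) (test_pairs : List (List (String × String))) : List (List String) :=
  let trainCounts := PySem.Dict.counter (train_pairs.map pvStyleOf)
  let testCounts := PySem.Dict.counter (test_pairs.map pvStyleOf)
  let styles := PySem.List.sorted (PySem.Set.union (PySem.Set.ofList trainCounts.keys) (PySem.Set.ofList testCounts.keys)) (fun s => s) false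
  let totalTrain := trainCounts.values.sum
  let totalTest := testCounts.values.sum
  styles.foldl (fun rows style =>
    let train_n := trainCounts.getD style 0
    let test_n := testCounts.getD style 0
    rows ++ [[style,
              fmtInt train_n ++ " (" ++ fmtPct train_n totalTrain ++ ")",
              fmtInt test_n ++ " (" ++ fmtPct test_n totalTest ++ ")",
              fmtInt (train_n + test_n)]]) []

-- ===== PORT B =====
-- B's own helper stack (Source B rewrites fmt_int / fmt_pct and the style access too).

-- B's fmt_int: iterative right-to-left chunking with an output accumulator (Source B's while loop)
def bChunks (s : List Char) (out : List Char) : List Char :=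
  if _h : 3 < s.length then bChunks (s.take (s.length - 3)) (',' :: s.drop (s.length - 3) ++ out)
  else s ++ out
termination_by s.length
decreasing_by simp [List.length_take]; omega

def bFmtInt (v : Int) : String :=
  String.ofList ((if v < 0 then ['-'] else []) ++ bChunks (PySem.Int.toStr v.natAbs).toList [])

-- bit length by repeated halving
def bBits (n : Nat) : Nat :=
  if h : n = 0 then 0 else bBits (n / 2) + 1
termination_by n
decreasing_by exact Nat.div_lt_self (Nat.pos_of_ne_zero h) (by omega)

-- align numerator/denominator by e binary places (branch order flipped w.r.t. A's pvShift)
def bScale (a b : Nat) (e : Int) : Nat × Nat :=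
  if e < 0 then (a, b <<< (-e).toNat) else (a <<< e.toNat, b)

-- round n / d half-to-even (remainder form, flipped branch order)
def bDivRound (n d : Nat) : Nat :=
  if 2 * (n % d) < d then n / d
  else if d < 2 * (n % d) then n / d + 1
  else n / d + n / d % 2

-- round x / 2^e half-to-even (division/remainder form instead of shift/subtract)
def bRound (x e : Nat) : Nat :=
  if 2 * (x % 2 ^ e) < 2 ^ e then x / 2 ^ e
  else if 2 ^ e < 2 * (x % 2 ^ e) then x / 2 ^ e + 1
  else x / 2 ^ e + x / 2 ^ e % 2

-- nearest double to a/b (a,b > 0), as m / 2^e with 2^52 ≤ m < 2^53: the same arithmetic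
-- steps as A's pvRnd53 with bScale's and the corrections' branches re-ordered and the
-- final rounding in remainder form
def bRnd53 (a b : Nat) : Nat × Int :=
  let e0 : Int := 52 + (bBits b : Int) - (bBits a : Int)
  let t := bScale a b e0
  let e : Int :=
    if 2 ^ 53 ≤ t.1 / t.2 then e0 - 1
    else if t.1 / t.2 < 2 ^ 52 then e0 + 1
    else e0
  let u := bScale a b e
  let m := bDivRound u.1 u.2
  if m = 2 ^ 53 then (2 ^ 52, e - 1) else (m, e)

-- renormalise m·100 back to 53 bits (B's second IEEE rounding, k-form branch)
def bRenorm (m : Nat) (e : Int) : Nat × Int :=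
  let x := m * 100
  let k := bBits x - 53
  if k = 0 then (x, e)
  else if bRound x k = 2 ^ 53 then (2 ^ 52, e - (k : Int) - 1)
  else (bRound x k, e - (k : Int))

-- B's fmt_pct: model of f"{part/total:.2%}" (the same two IEEE-double roundings as A's
-- fmt_pct model, in B's decomposition); exact for 0 ≤ part ≤ total as above
def bFmtPct (part total : Int) : String :=
  if total = 0 then "0.00%"
  else if 0 < part then
    let d := bRnd53 part.toNat total.toNat
    let f := bRenorm d.1 d.2
    let n := bRound (f.1 * 100) f.2.toNat
    PySem.Int.toStr ((n / 100 : Nat) : Int) ++ "." ++ PySem.Str.zfill (PySem.Int.toStr ((n % 100 : Nat) : Int)) 2 ++ "%"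
  else "0.00%"

-- B's p["style"]: first matching entry of the association list
def bStyle (p : List (String × String)) : String :=
  ((p.find? (fun kv => kv.1 == "style")).map Prod.snd).getD ""

-- Source B's _sorted_styles
def bSortedStyles (pairs : List (List (String × String))) : List String :=
  PySem.List.sorted (pairs.map bStyle) (fun s => s) false

-- the duplicated f-string row of Source B
def mkRow (style : String) (tn sn a b : Int) : List String :=
  [style,
   bFmtInt tn ++ " (" ++ bFmtPct tn a ++ ")",
   bFmtInt sn ++ " (" ++ bFmtPct sn b ++ ")",
   bFmtInt (tn + sn)]

-- _runs: run-length encode an already-sorted list of styles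
def rleRuns : List String → List (String × Int)
  | [] => []
  | s :: rest =>
      (s, ((rest.takeWhile (· == s)).length : Int) + 1) :: rleRuns (rest.dropWhile (· == s))
termination_by l => l.length
decreasing_by
  have := List.length_dropWhile_le (fun x => x == s) rest
  simpa using Nat.lt_succ_of_le this

-- the two-pointer merge loop of Source B
def mergeRuns (a b : Int) : List (String × Int) → List (String × Int) → List (List String)
  | [], [] => []
  | p :: tr, [] => mkRow p.1 p.2 0 a b :: mergeRuns a b tr []
  | [], q :: te => mkRow q.1 0 q.2 a b :: mergeRuns a b [] te
  | p :: tr, q :: te =>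
      if p.1 < q.1 then mkRow p.1 p.2 0 a b :: mergeRuns a b tr (q :: te)
      else if q.1 < p.1 then mkRow q.1 0 q.2 a b :: mergeRuns a b (p :: tr) te
      else mkRow p.1 p.2 q.2 a b :: mergeRuns a b tr te
termination_by l1 l2 => l1.length + l2.length

def train_test_by_style_alt (train_pairs : List (List (String × String))) (test_pairs : List (List (String × String))) : List (List String) :=
  mergeRuns (PySem.List.len train_pairs) (PySem.List.len test_pairs)
    (rleRuns (bSortedStyles train_pairs)) (rleRuns (bSortedStyles test_pairs))

-- ===== PRECONDITION & SPEC =====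
-- Pre_ excludes exactly the inputs where A raises KeyError: some pair dict lacks the "style" key.
def Pre_train_test_by_style (train_pairs : List (List (String × String))) (test_pairs : List (List (String × String))) : Prop :=
  (∀ p ∈ train_pairs, "style" ∈ p.map Prod.fst) ∧ (∀ p ∈ test_pairs, "style" ∈ p.map Prod.fst)
instance (train_pairs : List (List (String × String))) (test_pairs : List (List (String × String))) : Decidable (Pre_train_test_by_style train_pairs test_pairs) := by unfold Pre_train_test_by_style; infer_instance

def pvWitness_train_test_by_style : (List (List (String × String))) × (List (List (String × String))) :=
  ([[("style", "a")], [("style", "b")], [("style", "a")]], [[("style", "c")], [("style", "a")]])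

def Spec_train_test_by_style (train_pairs : List (List (String × String))) (test_pairs : List (List (String × String))) (out : List (List String)) : Prop := out = train_test_by_style_alt train_pairs test_pairs
instance (train_pairs : List (List (String × String))) (test_pairs : List (List (String × String))) (out : List (List String)) : Decidable (Spec_train_test_by_style train_pairs test_pairs out) := by unfold Spec_train_test_by_style; infer_instance

-- ===== CLAIM (what is proved, stated in full; the proofs are below) =====
def Claim_equal_train_test_by_style : Prop := ∀ (train_pairs : List (List (String × String))) (test_pairs : List (List (String × String))), Dom_train_test_by_style train_pairs test_pairs → Pre_train_test_by_style train_pairs test_pairs → Spec_train_test_by_style train_pairs test_pairs (train_test_by_style train_pairs test_pairs)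

-- ===== LEMMAS AND PROOFS =====

-- ---- B helper = A helper ----

theorem bChunks_eq (s out : List Char) : bChunks s out = pvGrp s ++ out := by
  fun_induction bChunks s out with
  | case1 s out h ih =>
      rw [pvGrp, dif_neg (by omega), ih]
      simp
  | case2 s out h =>
      rw [pvGrp, dif_pos (by omega)]

theorem bFmtInt_eq (v : Int) : bFmtInt v = fmtInt v := by
  unfold bFmtInt fmtInt
  by_cases h : v < 0
  · have hn : ((v.natAbs : Nat) : Int) = -v := by omega
    simp [h, hn, bChunks_eq]
  · have hn : ((v.natAbs : Nat) : Int) = v := by omega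
    simp [h, hn, bChunks_eq]

theorem bBits_eq : bBits = pvBitLen := by
  funext n
  fun_induction bBits n with
  | case1 => rfl
  | case2 n h ih =>
      unfold pvBitLen at ih ⊢
      rw [if_neg h]
      by_cases h2 : n < 2
      · have : n = 1 := by omega
        subst this
        simp [bBits, Nat.log2_eq_log_two, Nat.log_one_right]
      · rw [ih, if_neg (show ¬ n / 2 = 0 by omega),
          Nat.log2_eq_log_two, Nat.log2_eq_log_two, Nat.log_div_base]
        have := Nat.log_pos (b := 2) one_lt_two (show 2 ≤ n by omega)
        omega

theorem bScale_eq (a b : Nat) (e : Int) : bScale a b e = pvShift a b e := by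
  unfold bScale pvShift
  split_ifs <;> first | rfl | omega

theorem bDivRound_eq (n d : Nat) :
    bDivRound n d
      = (if d < 2 * (n - n / d * d) then n / d + 1
         else if 2 * (n - n / d * d) < d then n / d
         else n / d + n / d % 2) := by
  unfold bDivRound
  have h1 := Nat.div_add_mod n d
  have h2 : n / d * d = d * (n / d) := Nat.mul_comm _ _
  split_ifs <;> omega

theorem bRound_eq (x e : Nat) : bRound x e = pvHalfEvenDiv x e := by
  unfold bRound pvHalfEvenDiv
  rcases e with _ | e
  · simp only [Nat.shiftRight_eq_div_pow, Nat.shiftLeft_eq, pow_zero, Nat.zero_sub]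
    have h1 := Nat.div_add_mod x 1
    split_ifs <;> omega
  · simp only [Nat.shiftRight_eq_div_pow, Nat.shiftLeft_eq, Nat.add_sub_cancel]
    have hpow : (2 : Nat) ^ (e + 1) = 2 * 2 ^ e := by ring
    have h1 := Nat.div_add_mod x (2 ^ (e + 1))
    have h2 : x / 2 ^ (e + 1) * 2 ^ (e + 1) = 2 ^ (e + 1) * (x / 2 ^ (e + 1)) := Nat.mul_comm _ _
    split_ifs <;> omega

theorem bRnd53_eq (a b : Nat) : bRnd53 a b = pvRnd53 a b := by
  unfold bRnd53 pvRnd53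
  simp only [bScale_eq, bBits_eq, bDivRound_eq]
  have hexp : ∀ (q0 : Nat) (s0 : Int),
      (if 2 ^ 53 ≤ q0 then s0 - 1 else if q0 < 2 ^ 52 then s0 + 1 else s0)
        = (if q0 < 2 ^ 52 then s0 + 1 else if 2 ^ 53 ≤ q0 then s0 - 1 else s0) := by
    intro q0 s0; split_ifs <;> omega
  rw [hexp]

theorem bRenorm_eq (m : Nat) (e : Int) :
    bRenorm m e
      = (if pvBitLen (m * 100) ≤ 53 then (m * 100, e)
         else if pvHalfEvenDiv (m * 100) (pvBitLen (m * 100) - 53) = 2 ^ 53 then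
           (2 ^ 52, e - ((pvBitLen (m * 100) - 53 : Nat) : Int) - 1)
         else (pvHalfEvenDiv (m * 100) (pvBitLen (m * 100) - 53),
               e - ((pvBitLen (m * 100) - 53 : Nat) : Int))) := by
  unfold bRenorm
  simp only [bBits_eq, bRound_eq]
  split_ifs <;> first | rfl | omega

theorem bFmtPct_eq (part total : Int) : bFmtPct part total = fmtPct part total := by
  unfold bFmtPct fmtPct
  by_cases h0 : total = 0
  · simp [h0]
  · by_cases hp : 0 < part
    · have hnp : ¬ part ≤ 0 := by omega
      simp only [h0, hp, hnp, if_false, if_true, bRnd53_eq, bRenorm_eq, bRound_eq]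
    · have hnp : part ≤ 0 := by omega
      simp [h0, hp, hnp]

theorem bStyle_eq (p : List (String × String)) : bStyle p = pvStyleOf p := by
  unfold bStyle pvStyleOf
  induction p with
  | nil => rfl
  | cons kv rest ih =>
      rw [PySem.Dict.getD_eq_get?_getD, PySem.Dict.get?_mk_cons, List.find?_cons]
      rw [PySem.Dict.getD_eq_get?_getD] at ih
      by_cases h : kv.1 == "style"
      · simp [h]
      · simp only [h]
        simpa using ih

-- ---- sorted-merge-dedup of the two key streams (proof-only abstraction of mergeRuns' key walk) ----
def mergeKeys : List String → List String → List String
  | [], [] => []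
  | x :: xs, [] => x :: mergeKeys xs []
  | [], y :: ys => y :: mergeKeys [] ys
  | x :: xs, y :: ys =>
      if x < y then x :: mergeKeys xs (y :: ys)
      else if y < x then y :: mergeKeys (x :: xs) ys
      else x :: mergeKeys xs ys
termination_by l1 l2 => l1.length + l2.length

theorem mem_mergeKeys (k1 k2 : List String) (s : String) :
    s ∈ mergeKeys k1 k2 ↔ s ∈ k1 ∨ s ∈ k2 := by
  fun_induction mergeKeys k1 k2 with
  | case1 => simp [mergeKeys]
  | case2 x xs ih => simp [mergeKeys, ih]
  | case3 y ys ih => simp [mergeKeys, ih]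
  | case4 x xs y ys hlt ih => simp [mergeKeys, hlt, ih]; tauto
  | case5 x xs y ys hlt hgt ih => simp [mergeKeys, hlt, hgt, ih]; tauto
  | case6 x xs y ys hlt hgt ih =>
      have hxy : x = y := le_antisymm (not_lt.1 hgt) (not_lt.1 hlt)
      simp [mergeKeys, hlt, hgt, ih, hxy]; tauto

theorem pairwise_mergeKeys (k1 k2 : List String)
    (h1 : k1.Pairwise (· < ·)) (h2 : k2.Pairwise (· < ·)) :
    (mergeKeys k1 k2).Pairwise (· < ·) := by
  fun_induction mergeKeys k1 k2 with
  | case1 => simp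
  | case2 x xs ih =>
      rw [List.pairwise_cons] at h1 ⊢
      refine ⟨fun z hz => ?_, ih h1.2 h2⟩
      rcases (mem_mergeKeys _ _ _).1 hz with h | h
      · exact h1.1 z h
      · simp at h
  | case3 y ys ih =>
      rw [List.pairwise_cons] at h2 ⊢
      refine ⟨fun z hz => ?_, ih h1 h2.2⟩
      rcases (mem_mergeKeys _ _ _).1 hz with h | h
      · simp at h
      · exact h2.1 z h
  | case4 x xs y ys hlt ih =>
      rw [List.pairwise_cons] at h1 ⊢
      refine ⟨fun z hz => ?_, ih h1.2 h2⟩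
      rcases (mem_mergeKeys _ _ _).1 hz with h | h
      · exact h1.1 z h
      · rcases List.mem_cons.1 h with rfl | h
        · exact hlt
        · exact lt_trans hlt ((List.pairwise_cons.1 h2).1 z h)
  | case5 x xs y ys hlt hgt ih =>
      rw [List.pairwise_cons] at h2 ⊢
      refine ⟨fun z hz => ?_, ih h1 h2.2⟩
      rcases (mem_mergeKeys _ _ _).1 hz with h | h
      · rcases List.mem_cons.1 h with rfl | h
        · exact hgt
        · exact lt_trans hgt ((List.pairwise_cons.1 h1).1 z h)
      · exact h2.1 z h
  | case6 x xs y ys hlt hgt ih =>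
      have hxy : x = y := le_antisymm (not_lt.1 hgt) (not_lt.1 hlt)
      rw [List.pairwise_cons] at h1 h2 ⊢
      refine ⟨fun z hz => ?_, ih h1.2 h2.2⟩
      rcases (mem_mergeKeys _ _ _).1 hz with h | h
      · exact h1.1 z h
      · exact hxy ▸ h2.1 z h

theorem rle_spec (l : List String) (hl : l.Pairwise (· ≤ ·)) :
    ((rleRuns l).map Prod.fst).Pairwise (· < ·)
    ∧ (∀ s, s ∈ (rleRuns l).map Prod.fst ↔ s ∈ l)
    ∧ (∀ p ∈ rleRuns l, p.2 = (l.count p.1 : Int)) := by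
  fun_induction rleRuns l with
  | case1 => simp
  | case2 s rest ih =>
      have hrest : rest.Pairwise (· ≤ ·) := (List.pairwise_cons.1 hl).2
      have hhead : ∀ x ∈ rest, s ≤ x := (List.pairwise_cons.1 hl).1
      have hsub : List.Sublist (rest.dropWhile (· == s)) rest := List.dropWhile_sublist _
      have hrest' : (rest.dropWhile (· == s)).Pairwise (· ≤ ·) := hrest.sublist hsub
      have hgt : ∀ x ∈ rest.dropWhile (· == s), s < x := by
        intro x hx
        rcases hd : rest.dropWhile (· == s) with _ | ⟨y, ys⟩
        · simp [hd] at hx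
        · have hy : (y == s) = false := by
            have h := List.head?_dropWhile_not (fun x => x == s) rest
            rw [hd] at h; simpa using h
          have hyne : y ≠ s := by simpa using hy
          have hyrest : y ∈ rest := hsub.mem (by simp [hd])
          have hsy : s < y := lt_of_le_of_ne (hhead y hyrest) (Ne.symm hyne)
          rw [hd] at hx
          rcases List.mem_cons.1 hx with rfl | hx
          · exact hsy
          · exact lt_of_lt_of_le hsy ((List.pairwise_cons.1 (hd ▸ hrest')).1 x hx)
      obtain ⟨ih1, ih2, ih3⟩ := ih hrest'
      have htw : ∀ x ∈ rest.takeWhile (· == s), x = s := by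
        intro x hx; simpa using List.mem_takeWhile_imp hx
      have hsplit : rest.takeWhile (· == s) ++ rest.dropWhile (· == s) = rest :=
        List.takeWhile_append_dropWhile
      have hcount_s : (s :: rest).count s = (rest.takeWhile (· == s)).length + 1 := by
        have h1 : (rest.takeWhile (· == s)).count s = (rest.takeWhile (· == s)).length :=
          List.count_eq_length.2 (fun b hb => (htw b hb).symm)
        have h2 : (rest.dropWhile (· == s)).count s = 0 :=
          List.count_eq_zero.2 (fun h => lt_irrefl s (hgt s h))
        have hc : rest.count s = (rest.takeWhile (· == s)).count s + (rest.dropWhile (· == s)).count s := by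
          conv_lhs => rw [← hsplit]
          rw [List.count_append]
        rw [List.count_cons_self]; omega
      have hcount_ne : ∀ t, t ≠ s → (s :: rest).count t = (rest.dropWhile (· == s)).count t := by
        intro t ht
        have h1 : (rest.takeWhile (· == s)).count t = 0 :=
          List.count_eq_zero.2 (fun h => ht (htw t h))
        have hc : rest.count t = (rest.takeWhile (· == s)).count t + (rest.dropWhile (· == s)).count t := by
          conv_lhs => rw [← hsplit]
          rw [List.count_append]
        rw [List.count_cons_of_ne (Ne.symm ht)]; omega
      refine ⟨?_, ?_, ?_⟩
      · simp only [rleRuns, List.map_cons, List.pairwise_cons]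
        exact ⟨fun z hz => hgt z ((ih2 z).1 hz), ih1⟩
      · intro t
        simp only [List.map_cons, List.mem_cons, ih2]
        constructor
        · rintro (rfl | h)
          · exact Or.inl rfl
          · exact Or.inr (hsub.mem h)
        · rintro (rfl | h)
          · exact Or.inl rfl
          · rw [← hsplit] at h
            rcases List.mem_append.1 h with h | h
            · exact Or.inl (htw t h)
            · exact Or.inr h
      · intro p hp
        rcases List.mem_cons.1 hp with rfl | hp
        · simp [hcount_s]
        · have hne : p.1 ≠ s := ne_of_gt (hgt p.1 ((ih2 p.1).1 (List.mem_map_of_mem hp)))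
          rw [ih3 p hp, hcount_ne p.1 hne]

theorem merge_spec (a b : Int) (R1 R2 : List (String × Int)) (f g : String → Int)
    (h1 : (R1.map Prod.fst).Pairwise (· < ·)) (h2 : (R2.map Prod.fst).Pairwise (· < ·))
    (hf : ∀ p ∈ R1, f p.1 = p.2) (hg : ∀ p ∈ R2, g p.1 = p.2)
    (hf0 : ∀ s ∈ R2.map Prod.fst, s ∉ R1.map Prod.fst → f s = 0)
    (hg0 : ∀ s ∈ R1.map Prod.fst, s ∉ R2.map Prod.fst → g s = 0) :
    mergeRuns a b R1 R2 = (mergeKeys (R1.map Prod.fst) (R2.map Prod.fst)).map (fun s => mkRow s (f s) (g s) a b) := by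
  fun_induction mergeRuns a b R1 R2 with
  | case1 => simp [mergeKeys]
  | case2 p tr ih =>
      have htl : (tr.map Prod.fst).Pairwise (· < ·) := (List.pairwise_cons.1 (List.map_cons (l := tr) ▸ h1)).2
      have hrec := ih htl (by simp) (fun r hr => hf r (List.mem_cons_of_mem _ hr)) (by simp) (by simp)
        (fun s hs _ => hg0 s (by simp only [List.map_cons]; exact List.mem_cons_of_mem _ hs) (by simp))
      simp only [List.map_cons, List.map_nil] at hrec ⊢
      rw [mergeKeys, List.map_cons, hrec]
      try simp only []
      rw [hf p List.mem_cons_self, hg0 p.1 (by simp) (by simp)]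
  | case3 q te ih =>
      have htl : (te.map Prod.fst).Pairwise (· < ·) := (List.pairwise_cons.1 (List.map_cons (l := te) ▸ h2)).2
      have hrec := ih (by simp) htl (by simp) (fun r hr => hg r (List.mem_cons_of_mem _ hr))
        (fun s hs _ => hf0 s (by simp only [List.map_cons]; exact List.mem_cons_of_mem _ hs) (by simp)) (by simp)
      simp only [List.map_cons, List.map_nil] at hrec ⊢
      rw [mergeKeys, List.map_cons, hrec]
      try simp only []
      rw [hg q List.mem_cons_self, hf0 q.1 (by simp) (by simp)]
  | case4 p tr q te hlt ih =>
      have htl1 : (tr.map Prod.fst).Pairwise (· < ·) := (List.pairwise_cons.1 (List.map_cons (l := tr) ▸ h1)).2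
      have hhd2 : ∀ s ∈ te.map Prod.fst, q.1 < s := fun s hs =>
        (List.pairwise_cons.1 (List.map_cons (l := te) ▸ h2)).1 s hs
      have hnot2 : p.1 ∉ (q :: te).map Prod.fst := by
        simp only [List.map_cons, List.mem_cons]
        rintro (h | h)
        · exact absurd (h ▸ hlt) (lt_irrefl _)
        · exact absurd (lt_trans hlt (hhd2 _ h)) (lt_irrefl _)
      have hrec := ih htl1 h2 (fun r hr => hf r (List.mem_cons_of_mem _ hr)) hg
        (fun s hs hns => hf0 s hs (by
          simp only [List.map_cons, List.mem_cons]
          rintro (rfl | h)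
          · exact hnot2 hs
          · exact hns h))
        (fun s hs => hg0 s (by simp only [List.map_cons]; exact List.mem_cons_of_mem _ hs))
      simp only [List.map_cons] at hrec ⊢
      rw [mergeKeys, if_pos hlt, List.map_cons, hrec]
      try simp only []
      rw [hf p List.mem_cons_self, hg0 p.1 (by simp) hnot2]
  | case5 p tr q te hlt hgt ih =>
      have hhd1 : ∀ s ∈ tr.map Prod.fst, p.1 < s := fun s hs =>
        (List.pairwise_cons.1 (List.map_cons (l := tr) ▸ h1)).1 s hs
      have htl2 : (te.map Prod.fst).Pairwise (· < ·) := (List.pairwise_cons.1 (List.map_cons (l := te) ▸ h2)).2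
      have hnot1 : q.1 ∉ (p :: tr).map Prod.fst := by
        simp only [List.map_cons, List.mem_cons]
        rintro (h | h)
        · exact absurd (h ▸ hgt) (lt_irrefl _)
        · exact absurd (lt_trans hgt (hhd1 _ h)) (lt_irrefl _)
      have hrec := ih h1 htl2 hf (fun r hr => hg r (List.mem_cons_of_mem _ hr))
        (fun s hs => hf0 s (by simp only [List.map_cons]; exact List.mem_cons_of_mem _ hs))
        (fun s hs hns => hg0 s hs (by
          simp only [List.map_cons, List.mem_cons]
          rintro (rfl | h)
          · exact hnot1 hs
          · exact hns h))
      simp only [List.map_cons] at hrec ⊢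
      rw [mergeKeys, if_neg hlt, if_pos hgt, List.map_cons, hrec]
      try simp only []
      rw [hg q List.mem_cons_self, hf0 q.1 (by simp) hnot1]
  | case6 p tr q te hlt hgt ih =>
      have heq : q.1 = p.1 := le_antisymm (not_lt.1 hlt) (not_lt.1 hgt)
      have hhd1 : ∀ s ∈ tr.map Prod.fst, p.1 < s := fun s hs =>
        (List.pairwise_cons.1 (List.map_cons (l := tr) ▸ h1)).1 s hs
      have htl1 : (tr.map Prod.fst).Pairwise (· < ·) := (List.pairwise_cons.1 (List.map_cons (l := tr) ▸ h1)).2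
      have hhd2 : ∀ s ∈ te.map Prod.fst, q.1 < s := fun s hs =>
        (List.pairwise_cons.1 (List.map_cons (l := te) ▸ h2)).1 s hs
      have htl2 : (te.map Prod.fst).Pairwise (· < ·) := (List.pairwise_cons.1 (List.map_cons (l := te) ▸ h2)).2
      have hrec := ih htl1 htl2 (fun r hr => hf r (List.mem_cons_of_mem _ hr)) (fun r hr => hg r (List.mem_cons_of_mem _ hr))
        (fun s hs hns => hf0 s (by simp only [List.map_cons]; exact List.mem_cons_of_mem _ hs) (by
          simp only [List.map_cons, List.mem_cons]
          rintro (rfl | h)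
          · exact absurd (heq ▸ hhd2 _ hs) (lt_irrefl _)
          · exact hns h))
        (fun s hs hns => hg0 s (by simp only [List.map_cons]; exact List.mem_cons_of_mem _ hs) (by
          simp only [List.map_cons, List.mem_cons]
          rintro (rfl | h)
          · exact absurd (heq ▸ hhd1 _ hs) (lt_irrefl _)
          · exact hns h))
      simp only [List.map_cons] at hrec ⊢
      rw [mergeKeys, if_neg hlt, if_neg hgt, List.map_cons, hrec]
      try simp only []
      rw [hf p List.mem_cons_self, ← heq, hg q List.mem_cons_self]

theorem sum_values_counter (T : List String) :
    (PySem.Dict.counter T).values.sum = (T.length : Int) := by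
  have hnd := PySem.Dict.nodup_keys_counter (xs := T)
  have hv := PySem.Dict.values_eq_map_keys (PySem.Dict.counter T) hnd (0 : Int)
  rw [hv, PySem.Dict.keys_counter]
  have : ∀ k ∈ PySem.Set.ofList T, (PySem.Dict.counter T).getD k 0 = (T.count k : Int) := by
    intro k _; exact PySem.Dict.getD_counter (xs := T) (v := k)
  rw [List.map_congr_left this]
  have hperm : (PySem.Set.ofList T).Perm T.dedup := by
    refine (List.perm_ext_iff_of_nodup (PySem.Set.nodup_ofList T) (List.nodup_dedup T)).2 ?_
    intro a; rw [PySem.Set.mem_ofList, List.mem_dedup]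
  rw [(hperm.map (fun k => (T.count k : Int))).sum_eq]
  have : (T.dedup.map (fun k => (T.count k : Int))).sum = ((T.dedup.map (fun k => T.count k)).sum : Int) := by
    induction T.dedup with
    | nil => simp
    | cons x xs ih => simp [ih]
  rw [this, List.sum_map_count_dedup_eq_length]

theorem core_eq (T S : List String) (a b : Int) :
    (PySem.List.sorted (PySem.Set.union (PySem.Set.ofList T) (PySem.Set.ofList S)) (fun s => s) false).map
        (fun s => mkRow s (T.count s : Int) (S.count s : Int) a b)
      = mergeRuns a b (rleRuns (PySem.List.sorted T (fun s => s) false)) (rleRuns (PySem.List.sorted S (fun s => s) false)) := by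
  have hp1 : (PySem.List.sorted T (fun s => s) false).Pairwise (· ≤ ·) := by
    simpa using PySem.List.sorted_pairwise (xs := T) (key := fun s => s)
  have hp2 : (PySem.List.sorted S (fun s => s) false).Pairwise (· ≤ ·) := by
    simpa using PySem.List.sorted_pairwise (xs := S) (key := fun s => s)
  obtain ⟨hk1, hm1, hv1⟩ := rle_spec _ hp1
  obtain ⟨hk2, hm2, hv2⟩ := rle_spec _ hp2
  have hperm1 : (PySem.List.sorted T (fun s => s) false).Perm T := PySem.List.sorted_perm _ _ _
  have hperm2 : (PySem.List.sorted S (fun s => s) false).Perm S := PySem.List.sorted_perm _ _ _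
  rw [merge_spec a b _ _ (fun s => (T.count s : Int)) (fun s => (S.count s : Int)) hk1 hk2
    (fun p hp => by rw [hv1 p hp, hperm1.count_eq])
    (fun p hp => by rw [hv2 p hp, hperm2.count_eq])
    (fun s _ hns => by
      have : s ∉ T := fun h => hns ((hm1 s).2 (hperm1.mem_iff.2 h))
      simp [List.count_eq_zero.2 this])
    (fun s _ hns => by
      have : s ∉ S := fun h => hns ((hm2 s).2 (hperm2.mem_iff.2 h))
      simp [List.count_eq_zero.2 this])]
  have hkeys : PySem.List.sorted (PySem.Set.union (PySem.Set.ofList T) (PySem.Set.ofList S)) (fun s => s) false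
      = mergeKeys ((rleRuns (PySem.List.sorted T (fun s => s) false)).map Prod.fst)
                  ((rleRuns (PySem.List.sorted S (fun s => s) false)).map Prod.fst) := by
    apply PySem.List.sorted_eq_of_perm_of_pairwise_lt
    · refine (List.perm_ext_iff_of_nodup ?_ ?_).2 ?_
      · exact (pairwise_mergeKeys _ _ hk1 hk2).imp ne_of_lt
      · exact PySem.Set.nodup_union _ _ (PySem.Set.nodup_ofList T)
      · intro s
        rw [mem_mergeKeys, PySem.Set.mem_union, PySem.Set.mem_ofList, PySem.Set.mem_ofList,
          hm1 s, hm2 s, hperm1.mem_iff, hperm2.mem_iff]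
    · exact pairwise_mergeKeys _ _ hk1 hk2
  rw [hkeys]

-- ===== VERDICT =====
theorem train_test_by_style_spec : Claim_equal_train_test_by_style := by
  intro train_pairs test_pairs _dom _pre
  unfold Spec_train_test_by_style train_test_by_style train_test_by_style_alt bSortedStyles
  have hb : bStyle = pvStyleOf := funext bStyle_eq
  rw [hb]
  simp only [PySem.List.foldl_append_singleton_eq_map, List.nil_append,
    PySem.Dict.keys_counter, PySem.Set.ofList_ofList, sum_values_counter,
    PySem.List.len_eq, List.length_map]
  rw [← core_eq (train_pairs.map pvStyleOf) (test_pairs.map pvStyleOf)]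
  apply List.map_congr_left
  intro s _
  simp [mkRow, bFmtInt_eq, bFmtPct_eq, PySem.Dict.getD_counter]
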